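-- pv_equiv track=rewrite | github.com/vinayswamik/wisq | src/wisq/sarouting.py | executable_subset
-- ===== SOURCE A (Python) =====
-- def executable_subset(gates : dict):
--     executable = {}
--     remainining = {}
--     blocked_qubits = set()
--     for i,gate in gates.items():
--             not_blocked = all([q not in blocked_qubits for q in gate])
--             if not_blocked:
--                 executable[i] = gates[i]
--                 blocked_qubits.update(set(q for q in gate))
--             else:
--                 remainining[i] = gates[i]
--                 blocked_qubits.update(set(q for q in gate))
--     return executable, remainining
-- ===== SOURCE B (Python) =====
-- def executable_subset(gates : dict):
--     # Pass 1: map each qubit to the key of the first gate that uses it.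
--     first_seen = {}
--     for i, gate in gates.items():
--         for q in gate:
--             first_seen.setdefault(q, i)
--     # Pass 2: a gate is executable iff it is the first gate on every one of its qubits.
--     executable = {}
--     remaining = {}
--     for i, gate in gates.items():
--         if all(first_seen[q] == i for q in gate):
--             executable[i] = gate
--         else:
--             remaining[i] = gate
--     return executable, remaining
-- ===== Notes on version B (the rewrite author's own statement) =====
-- stated objective: alternative
-- what changed: Replaces the running blocked_qubits set with a precomputed first-occurrence table (qubit -> key of the first gate using it) followed by a stateless classification pass: a gate is executable iff it is the first gate on all of its qubits.
import Mathlib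
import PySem

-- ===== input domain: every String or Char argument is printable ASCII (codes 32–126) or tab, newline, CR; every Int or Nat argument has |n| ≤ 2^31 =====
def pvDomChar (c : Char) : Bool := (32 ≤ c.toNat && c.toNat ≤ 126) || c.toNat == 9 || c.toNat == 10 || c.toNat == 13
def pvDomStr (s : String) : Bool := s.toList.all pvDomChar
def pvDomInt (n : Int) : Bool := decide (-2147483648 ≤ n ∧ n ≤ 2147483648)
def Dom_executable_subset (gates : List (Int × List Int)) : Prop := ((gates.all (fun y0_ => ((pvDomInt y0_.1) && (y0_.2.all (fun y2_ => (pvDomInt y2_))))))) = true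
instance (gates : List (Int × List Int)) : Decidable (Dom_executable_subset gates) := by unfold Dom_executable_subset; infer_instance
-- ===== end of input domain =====

-- B replaces A's running blocked-qubit set with a precomputed first-occurrence table plus a
-- stateless classification pass (alternative decomposition, same asymptotic cost).

-- ===== PORT A =====
-- one iteration of A's loop body: state = (executable, remainining, blocked_qubits)
def pvStepA (gates : List (Int × List Int))
    (st : PySem.Dict Int (List Int) × PySem.Dict Int (List Int) × PySem.Set Int)
    (ig : Int × List Int) :
    PySem.Dict Int (List Int) × PySem.Dict Int (List Int) × PySem.Set Int :=
  let notBlocked := (ig.2.map (fun q => !(PySem.Set.contains st.2.2 q))).all (fun b => b)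
  if notBlocked then
    (st.1.insert ig.1 (((PySem.Dict.mk gates).get? ig.1).getD []), st.2.1,
      PySem.Set.update st.2.2 (PySem.Set.ofList ig.2))
  else
    (st.1, st.2.1.insert ig.1 (((PySem.Dict.mk gates).get? ig.1).getD []),
      PySem.Set.update st.2.2 (PySem.Set.ofList ig.2))

def executable_subset (gates : List (Int × List Int)) :
    (List (Int × List Int)) × (List (Int × List Int)) :=
  let st := gates.foldl (pvStepA gates) (PySem.Dict.empty, PySem.Dict.empty, PySem.Set.empty)
  (st.1.items, st.2.1.items)

-- ===== PORT B =====
-- pass 1: qubit -> key of the first gate using it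
def pvFirstSeen (gates : List (Int × List Int)) : PySem.Dict Int Int :=
  gates.foldl (fun d ig => ig.2.foldl (fun d q => d.setdefault q ig.1) d) PySem.Dict.empty

-- pass 2, one iteration: state = (executable, remaining)
def pvStepB (fs : PySem.Dict Int Int)
    (st : PySem.Dict Int (List Int) × PySem.Dict Int (List Int)) (ig : Int × List Int) :
    PySem.Dict Int (List Int) × PySem.Dict Int (List Int) :=
  if ig.2.all (fun q => fs.get? q == some ig.1) then
    (st.1.insert ig.1 ig.2, st.2)
  else
    (st.1, st.2.insert ig.1 ig.2)

def executable_subset_alt (gates : List (Int × List Int)) :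
    (List (Int × List Int)) × (List (Int × List Int)) :=
  let st := gates.foldl (pvStepB (pvFirstSeen gates)) (PySem.Dict.empty, PySem.Dict.empty)
  (st.1.items, st.2.items)

-- ===== PRECONDITION & SPEC =====
-- Pre_ excludes association lists with duplicate keys: the Python parameter is a dict, whose
-- key sequence is always duplicate-free, so such lists do not represent any Python input.
def Pre_executable_subset (gates : List (Int × List Int)) : Prop :=
  (gates.map Prod.fst).Nodup
instance (gates : List (Int × List Int)) : Decidable (Pre_executable_subset gates) := by
  unfold Pre_executable_subset; infer_instance

def pvWitness_executable_subset : (List (Int × List Int)) := [(0, [1, 2]), (1, [2, 3]), (2, [4])]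

def Spec_executable_subset (gates : List (Int × List Int)) (out : (List (Int × List Int)) × (List (Int × List Int))) : Prop := out = executable_subset_alt gates
instance (gates : List (Int × List Int)) (out : (List (Int × List Int)) × (List (Int × List Int))) : Decidable (Spec_executable_subset gates out) := by unfold Spec_executable_subset; infer_instance

-- ===== CLAIM (what is proved, stated in full; the proofs are below) =====
def Claim_equal_executable_subset : Prop := ∀ (gates : List (Int × List Int)), Dom_executable_subset gates → Pre_executable_subset gates → Spec_executable_subset gates (executable_subset gates)

-- ===== LEMMAS AND PROOFS =====

-- the inner setdefault loop of pass 1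
lemma pv_fs_inner (g : List Int) (i : Int) :
    ∀ (d : PySem.Dict Int Int) (q : Int),
    (g.foldl (fun d q' => d.setdefault q' i) d).get? q =
      if (d.get? q).isSome then d.get? q else if q ∈ g then some i else none := by
  induction g with
  | nil => intro d q; cases h : d.get? q <;> simp [h]
  | cons x g ih =>
    intro d q
    rw [List.foldl_cons, ih]
    by_cases hqx : q = x
    · subst hqx
      rw [PySem.Dict.get?_setdefault_self]
      cases h : d.get? q <;> simp [h]
    · rw [PySem.Dict.get?_setdefault_of_ne _ _ hqx]
      cases h : d.get? q <;> simp [h, hqx]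

-- pass 1 as a whole computes the first gate (in list order) using each qubit
lemma pv_fs_outer (l : List (Int × List Int)) :
    ∀ (d : PySem.Dict Int Int) (q : Int),
    (l.foldl (fun d ig => ig.2.foldl (fun d q' => d.setdefault q' ig.1) d) d).get? q =
      if (d.get? q).isSome then d.get? q
      else (l.find? (fun ig => ig.2.contains q)).map Prod.fst := by
  induction l with
  | nil => intro d q; cases h : d.get? q <;> simp [h]
  | cons ig l ih =>
    intro d q
    rw [List.foldl_cons, ih, pv_fs_inner]
    by_cases hd : (d.get? q).isSome
    · simp [hd]
    · simp only [hd, if_false]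
      by_cases hqg : q ∈ ig.2
      · simp [hqg]
      · simp [hqg]

lemma pv_fs_get (gates : List (Int × List Int)) (q : Int) :
    (pvFirstSeen gates).get? q = (gates.find? (fun ig => ig.2.contains q)).map Prod.fst := by
  unfold pvFirstSeen
  rw [pv_fs_outer]
  simp [PySem.Dict.get?_empty]

-- main loop correspondence: walking the remaining suffix l, A's blocked set holds exactly the
-- qubits of the processed prefix, and the two loop bodies then make identical decisions.
lemma pv_loop (gates : List (Int × List Int)) (hnd : (gates.map Prod.fst).Nodup) :
    ∀ (l pre : List (Int × List Int)), gates = pre ++ l →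
    ∀ (ex rem : PySem.Dict Int (List Int)) (blocked : PySem.Set Int),
    (∀ q, PySem.Set.contains blocked q = true ↔ q ∈ pre.flatMap Prod.snd) →
    ((l.foldl (pvStepA gates) (ex, rem, blocked)).1,
     (l.foldl (pvStepA gates) (ex, rem, blocked)).2.1) =
      l.foldl (pvStepB (pvFirstSeen gates)) (ex, rem) := by
  intro l
  induction l with
  | nil => intro pre hpre ex rem blocked hb; rfl
  | cons ig l ih =>
    intro pre hpre ex rem blocked hb
    obtain ⟨i, g⟩ := ig
    -- key of the head is fresh w.r.t. the prefix
    have hki : i ∉ pre.map Prod.fst := by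
      intro hmem
      have hh := hpre ▸ hnd
      rw [List.map_append, List.nodup_append] at hh
      exact hh.2.2 i hmem i (by simp) rfl
    -- A's dict lookup gates[i] returns the head's gate
    have hlook : (PySem.Dict.mk gates).get? i = some g := by
      show ((gates.find? (fun p => p.1 == i)).map Prod.snd) = some g
      rw [hpre, List.find?_append]
      have hpre_none : pre.find? (fun p => p.1 == i) = none := by
        rw [List.find?_eq_none]
        intro x hx hbe
        exact hki (List.mem_map.mpr ⟨x, hx, by simpa using hbe⟩)
      simp [hpre_none, List.find?_cons]
    -- the two branch conditions agree
    have hpt : ∀ q ∈ g, (!(PySem.Set.contains blocked q))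
        = ((pvFirstSeen gates).get? q == some i) := by
      intro q hq
      rw [pv_fs_get]
      by_cases hqpre : q ∈ pre.flatMap Prod.snd
      · have hbt : PySem.Set.contains blocked q = true := (hb q).mpr hqpre
        obtain ⟨p, hp, hqp⟩ := List.mem_flatMap.mp hqpre
        have hps : (pre.find? (fun ig => ig.2.contains q)).isSome := by
          rw [List.find?_isSome]
          exact ⟨p, hp, by simpa using hqp⟩
        obtain ⟨p0, hp0⟩ := Option.isSome_iff_exists.mp hps
        have hp0mem : p0 ∈ pre := List.mem_of_find?_eq_some hp0
        have hne : p0.1 ≠ i := by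
          intro he
          exact hki (he ▸ List.mem_map.mpr ⟨p0, hp0mem, rfl⟩)
        rw [hpre, List.find?_append, hp0, hbt]
        simp [hne]
      · have hbf : PySem.Set.contains blocked q = false := by
          cases h : PySem.Set.contains blocked q
          · rfl
          · exact absurd ((hb q).mp h) hqpre
        have hpre_none : pre.find? (fun ig => ig.2.contains q) = none := by
          rw [List.find?_eq_none]
          intro x hx hcx
          exact hqpre (List.mem_flatMap.mpr ⟨x, hx, by simpa using hcx⟩)
        rw [hpre, List.find?_append, hpre_none, hbf]
        simp [hq]
    have hcond : ((g.map (fun q => !(PySem.Set.contains blocked q))).all (fun b => b))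
        = g.all (fun q => (pvFirstSeen gates).get? q == some i) := by
      rw [List.all_map]
      refine Bool.eq_iff_iff.mpr ?_
      simp only [List.all_eq_true, Function.comp]
      constructor
      · intro h q hq; rw [← hpt q hq]; exact h q hq
      · intro h q hq; rw [hpt q hq]; exact h q hq
    -- invariant for the extended prefix
    have hpre' : gates = (pre ++ [(i, g)]) ++ l := by simp [hpre]
    have hb' : ∀ q, PySem.Set.contains (PySem.Set.update blocked (PySem.Set.ofList g)) q = true
        ↔ q ∈ (pre ++ [(i, g)]).flatMap Prod.snd := by
      intro q
      rw [PySem.Set.contains_iff, PySem.Set.mem_update, PySem.Set.mem_ofList,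
        ← PySem.Set.contains_iff blocked q, hb q]
      simp [List.flatMap_append]
    simp only [List.foldl_cons, pvStepA, pvStepB, hlook, Option.getD_some, hcond]
    cases hc : g.all (fun q => (pvFirstSeen gates).get? q == some i) <;>
      simp only [Bool.false_eq_true, if_false, if_true] <;>
      exact ih (pre ++ [(i, g)]) hpre' _ _ _ hb'

-- ===== VERDICT (by name: the statement is the Claim_ definition above) =====
theorem executable_subset_spec : Claim_equal_executable_subset := by
  intro gates _ hnd
  show executable_subset gates = executable_subset_alt gates
  have h := pv_loop gates hnd gates [] rfl PySem.Dict.empty PySem.Dict.empty PySem.Set.empty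
    (by intro q; simp [PySem.Set.empty])
  simp only [executable_subset, executable_subset_alt]
  rw [← h]
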